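-- pv_equiv track=rewrite | github.com/alexbnewhouse/network-inference | src/semantic/phrase_mwe.py | promote_phrases
-- ===== SOURCE A (Python) =====
-- def promote_phrases(docs, pmi):
--     # Replace bigrams in docs with joined phrase if in pmi
--     new_docs = []
--     for doc in docs:
--         i = 0
--         new_doc = []
--         while i < len(doc):
--             if i < len(doc) - 1 and (doc[i], doc[i+1]) in pmi:
--                 new_doc.append(f"{doc[i]}_{doc[i+1]}")
--                 i += 2
--             else:
--                 new_doc.append(doc[i])
--                 i += 1
--         new_docs.append(new_doc)
--     return new_docs
-- ===== SOURCE B (Python) =====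
-- def promote_phrases(docs, pmi):
--     # Pairwise zip with a skip flag instead of an index-based while loop
--     out = []
--     for doc in docs:
--         new_doc = []
--         skip = False
--         for a, b in zip(doc, doc[1:]):
--             if skip:
--                 skip = False
--             elif (a, b) in pmi:
--                 new_doc.append(f"{a}_{b}")
--                 skip = True
--             else:
--                 new_doc.append(a)
--         if doc and not skip:
--             new_doc.append(doc[-1])
--         out.append(new_doc)
--     return out
-- ===== Notes on version B (the rewrite author's own statement) =====
-- stated objective: alternative
-- what changed: Replaces the index-based while loop with jump-by-two indexing by a single pass over zip(doc, doc[1:]) carrying a boolean skip flag, appending the final token afterwards only when it was not consumed.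
import Mathlib
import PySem

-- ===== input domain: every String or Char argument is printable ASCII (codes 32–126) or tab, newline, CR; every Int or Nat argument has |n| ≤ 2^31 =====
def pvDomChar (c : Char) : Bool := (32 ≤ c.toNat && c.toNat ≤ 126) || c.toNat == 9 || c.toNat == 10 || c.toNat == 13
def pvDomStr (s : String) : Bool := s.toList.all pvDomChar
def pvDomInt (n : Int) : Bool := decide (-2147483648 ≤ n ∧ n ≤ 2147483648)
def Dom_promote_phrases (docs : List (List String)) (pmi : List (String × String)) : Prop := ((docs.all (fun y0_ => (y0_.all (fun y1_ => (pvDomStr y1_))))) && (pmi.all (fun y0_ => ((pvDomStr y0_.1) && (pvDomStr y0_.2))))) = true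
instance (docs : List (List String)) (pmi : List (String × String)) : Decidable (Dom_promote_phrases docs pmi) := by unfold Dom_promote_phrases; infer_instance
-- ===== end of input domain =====

-- B replaces A's index-based while loop (jump-by-two) with one pass over zip(doc, doc[1:])
-- carrying a skip flag; alternative decomposition, same cost.


-- ===== PORT A =====
-- the while loop over index i (i += 2 on a merge, else i += 1)
def procA (pmi : List (String × String)) (doc : List String) (i : Nat) : List String :=
  if _h : i < doc.length then
    if i < doc.length - 1 ∧ pmi.contains (doc.getD i "", doc.getD (i+1) "") then
      (doc.getD i "" ++ "_" ++ doc.getD (i+1) "") :: procA pmi doc (i+2)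
    else
      doc.getD i "" :: procA pmi doc (i+1)
  else []
termination_by doc.length - i

def promote_phrases (docs : List (List String)) (pmi : List (String × String)) : List (List String) :=
  docs.map (fun doc => procA pmi doc 0)

-- ===== PORT B =====
-- the for-loop over zip(doc, doc[1:]) with the (new_doc, skip) state
def loopB (pmi : List (String × String)) : List (String × String) → List String × Bool → List String × Bool
  | [], st => st
  | (a, b) :: ps, (acc, skip) =>
    if skip then loopB pmi ps (acc, false)
    else if pmi.contains (a, b) then loopB pmi ps (acc ++ [a ++ "_" ++ b], true)
    else loopB pmi ps (acc ++ [a], false)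

def procB (pmi : List (String × String)) (doc : List String) : List String :=
  let st := loopB pmi (doc.zip (doc.drop 1)) ([], false)
  if doc ≠ [] ∧ st.2 = false then st.1 ++ [doc.getLastD ""] else st.1

def promote_phrases_alt (docs : List (List String)) (pmi : List (String × String)) : List (List String) :=
  docs.map (fun doc => procB pmi doc)

-- ===== PRECONDITION & SPEC =====
def Spec_promote_phrases (docs : List (List String)) (pmi : List (String × String)) (out : List (List String)) : Prop := out = promote_phrases_alt docs pmi
instance (docs : List (List String)) (pmi : List (String × String)) (out : List (List String)) : Decidable (Spec_promote_phrases docs pmi out) := by unfold Spec_promote_phrases; infer_instance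

-- ===== CLAIM (what is proved, stated in full; the proofs are below) =====
def Claim_equal_promote_phrases : Prop := ∀ (docs : List (List String)) (pmi : List (String × String)), Dom_promote_phrases docs pmi → Spec_promote_phrases docs pmi (promote_phrases docs pmi)

-- ===== LEMMAS AND PROOFS =====

-- reference structural recursion the two per-document loops are both proved equal to
def procS (pmi : List (String × String)) : List String → List String
  | [] => []
  | [a] => [a]
  | a :: b :: rest =>
    if pmi.contains (a, b) then (a ++ "_" ++ b) :: procS pmi rest
    else a :: procS pmi (b :: rest)

theorem procA_eq_procS (pmi : List (String × String)) (doc : List String) (i : Nat) :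
    procA pmi doc i = procS pmi (doc.drop i) := by
  have H : ∀ n doc (i : Nat), doc.length - i ≤ n → procA pmi doc i = procS pmi (doc.drop i) := by
    intro n
    induction n with
    | zero =>
      intro doc i h
      rw [procA]
      have hnl : ¬ i < doc.length := by omega
      rw [dif_neg hnl, List.drop_eq_nil_of_le (as := doc) (i := i) (by omega)]
      rfl
    | succ n ih =>
      intro doc i h
      rw [procA]
      by_cases hi : i < doc.length
      · have hd : doc.drop i = doc[i] :: doc.drop (i+1) := List.drop_eq_getElem_cons hi
        have hg : doc.getD i "" = doc[i] := List.getD_eq_getElem doc "" hi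
        by_cases hi1 : i + 1 < doc.length
        · have hd1 : doc.drop (i+1) = doc[i+1] :: doc.drop (i+2) := List.drop_eq_getElem_cons hi1
          have hg1 : doc.getD (i+1) "" = doc[i+1] := List.getD_eq_getElem doc "" hi1
          by_cases hmem : pmi.contains (doc[i], doc[i+1])
          · have : i < doc.length - 1 ∧ pmi.contains (doc.getD i "", doc.getD (i+1) "") := by
              refine ⟨by omega, by rw [hg, hg1]; exact hmem⟩
            rw [dif_pos hi, if_pos this, hd, hd1, procS, if_pos hmem, hg, hg1,
              ih doc (i+2) (by omega)]
          · have : ¬ (i < doc.length - 1 ∧ pmi.contains (doc.getD i "", doc.getD (i+1) "")) := by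
              rw [hg, hg1]; intro hc; exact hmem hc.2
            rw [dif_pos hi, if_neg this, hd, hd1, procS, if_neg hmem, hg,
              ih doc (i+1) (by omega), hd1]
        · have hone : doc.drop (i+1) = [] := List.drop_eq_nil_of_le (by omega)
          have : ¬ (i < doc.length - 1 ∧ pmi.contains (doc.getD i "", doc.getD (i+1) "")) := by
            intro hc; omega
          rw [dif_pos hi, if_neg this, hd, hone, hg, procS,
            ih doc (i+1) (by omega), hone, procS]
      · rw [dif_neg hi, List.drop_eq_nil_of_le (as := doc) (i := i) (by omega)]
        rfl
  exact H (doc.length - i) doc i le_rfl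

-- one finished per-document run of B's loop (state threaded exactly as in procB)
theorem loopB_finish (pmi : List (String × String)) (doc : List String) (acc : List String) :
    (if doc ≠ [] ∧ (loopB pmi (doc.zip (doc.drop 1)) (acc, false)).2 = false
     then (loopB pmi (doc.zip (doc.drop 1)) (acc, false)).1 ++ [doc.getLastD ""]
     else (loopB pmi (doc.zip (doc.drop 1)) (acc, false)).1) = acc ++ procS pmi doc := by
  have H : ∀ n (doc : List String) acc, doc.length ≤ n →
      (if doc ≠ [] ∧ (loopB pmi (doc.zip (doc.drop 1)) (acc, false)).2 = false
       then (loopB pmi (doc.zip (doc.drop 1)) (acc, false)).1 ++ [doc.getLastD ""]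
       else (loopB pmi (doc.zip (doc.drop 1)) (acc, false)).1) = acc ++ procS pmi doc := by
    intro n
    induction n with
    | zero =>
      intro doc acc h
      have : doc = [] := List.eq_nil_of_length_eq_zero (by omega)
      subst this; simp [loopB, procS]
    | succ n ih =>
      intro doc acc h
      match doc with
      | [] => simp [loopB, procS]
      | [a] => simp [loopB, procS]
      | a :: b :: rest =>
        have hz : (a :: b :: rest).zip ((a :: b :: rest).drop 1)
            = (a, b) :: ((b :: rest).zip rest) := by simp
        by_cases hmem : pmi.contains (a, b)
        · -- merged: skip is set; the next pair (if any) only clears it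
          rw [hz]
          simp only [loopB, hmem, if_pos, if_neg (by simp : ¬ (false = true))]
          have hmem' : (a, b) ∈ pmi := by simpa using hmem
          match rest with
          | [] =>
            simp [loopB, procS, hmem']
          | c :: rs =>
            have hz2 : (c :: rs).zip ((c :: rs).drop 1) = (c :: rs).zip rs := by simp
            have hskip : loopB pmi ((b :: c :: rs).zip (c :: rs)) (acc ++ [a ++ "_" ++ b], true)
                = loopB pmi ((c :: rs).zip rs) (acc ++ [a ++ "_" ++ b], false) := by
              simp [loopB]
            have := ih (c :: rs) (acc ++ [a ++ "_" ++ b]) (by simp at h ⊢; omega)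
            rw [hz2] at this
            simp only [procS, hmem, if_pos]
            simp only [List.zip] at hskip ⊢
            rw [hskip]
            simpa [List.getLastD_cons] using this
        · -- not merged: plain append, state is exactly the run on (b :: rest)
          have := ih (b :: rest) (acc ++ [a]) (by simp at h ⊢; omega)
          rw [hz]
          simp only [loopB, hmem, Bool.false_eq_true, if_false]
          simp only [procS, hmem, Bool.false_eq_true, if_false]
          have hz3 : (b :: rest).zip ((b :: rest).drop 1) = (b :: rest).zip rest := by simp
          rw [hz3] at this
          simpa [List.getLastD_cons] using this
  exact H doc.length doc acc le_rfl

theorem procB_eq_procS (pmi : List (String × String)) (doc : List String) :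
    procB pmi doc = procS pmi doc := by
  have := loopB_finish pmi doc []
  simpa [procB] using this

-- ===== VERDICT (by name: the statement is the Claim_ definition above) =====
theorem promote_phrases_spec : Claim_equal_promote_phrases := by
  intro docs pmi _
  unfold Spec_promote_phrases promote_phrases promote_phrases_alt
  refine List.map_congr_left ?_
  intro doc _
  rw [procB_eq_procS]
  simpa using procA_eq_procS pmi doc 0
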